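-- pv_equiv track=rewrite | github.com/Manoama/Methods | ЛР4/laba4.py | max_nd_el_coord
-- ===== SOURCE A (Python) =====
-- def max_nd_el_coord(A):
--     point = list()
--     max_elem = A[0][1]
--     point = [0, 1]
--     for i in range(len(A) - 1):
--         for j in range(i+1, len(A)):
--             if max_elem < A[i][j]:
--                 max_elem = A[i][j]
--                 point = [i, j]
--     return point
-- ===== SOURCE B (Python) =====
-- def max_nd_el_coord(A):
--     n = len(A)
--     max_value = max(A[i][j] for i in range(n - 1) for j in range(i + 1, n))
--     for i in range(n - 1):
--         for j in range(i + 1, n):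
--             if A[i][j] == max_value:
--                 return [i, j]
-- ===== Notes on version B (the rewrite author's own statement) =====
-- stated objective: alternative
-- what changed: Replaced A's single pass that tracks a running maximum together with its coordinates by an aggregate-then-locate decomposition: first compute the strict-upper-triangle maximum with max() over a generator, then a second row-major scan returns the first coordinates attaining it.
-- outside the precondition, e.g. on max_nd_el_coord([[1, 2]]): A returns [0, 1], B raises ValueError
import Mathlib
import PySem

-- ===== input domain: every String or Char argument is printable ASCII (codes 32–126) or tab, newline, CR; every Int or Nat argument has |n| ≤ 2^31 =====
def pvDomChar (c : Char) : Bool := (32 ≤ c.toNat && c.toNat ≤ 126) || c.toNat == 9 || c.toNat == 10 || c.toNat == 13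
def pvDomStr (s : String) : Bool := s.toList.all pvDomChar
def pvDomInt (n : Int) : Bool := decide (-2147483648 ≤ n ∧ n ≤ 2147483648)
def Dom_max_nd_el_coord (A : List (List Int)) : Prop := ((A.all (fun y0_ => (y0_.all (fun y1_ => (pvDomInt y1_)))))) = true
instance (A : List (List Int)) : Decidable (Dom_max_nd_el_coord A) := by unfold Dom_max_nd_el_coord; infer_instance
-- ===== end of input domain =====

-- B replaces A's combined running-max-and-coordinate tracking with an aggregate-then-locate
-- decomposition (compute the triangle maximum first, then find its first coordinates); objective: alternative.

-- A[i][j] for nonnegative in-range indices (Pre_ guarantees in range; 0 is an arbitrary default)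
def pvGet2 (A : List (List Int)) (i j : Int) : Int :=
  ((PySem.List.pyGet? A i).bind (fun r => PySem.List.pyGet? r j)).getD 0

-- ===== PORT A =====
def max_nd_el_coord (A : List (List Int)) : List Int :=
  ((PySem.List.pyRange 0 ((A.length : Int) - 1) 1).foldl (fun st i =>
      (PySem.List.pyRange (i + 1) (A.length : Int) 1).foldl (fun st j =>
        if st.1 < pvGet2 A i j then (pvGet2 A i j, [i, j]) else st) st)
      (pvGet2 A 0 1, ([0, 1] : List Int))).2

-- ===== PORT B =====
def max_nd_el_coord_alt (A : List (List Int)) : List Int :=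
  match PySem.List.max? ((PySem.List.pyRange 0 ((A.length : Int) - 1) 1).flatMap (fun i =>
      (PySem.List.pyRange (i + 1) (A.length : Int) 1).map (fun j => pvGet2 A i j))) (fun x => x) with
  | none => []  -- Python: max() raises ValueError here; excluded by Pre_
  | some mv =>
    match ((PySem.List.pyRange 0 ((A.length : Int) - 1) 1).flatMap (fun i =>
        (PySem.List.pyRange (i + 1) (A.length : Int) 1).map (fun j => (i, j)))).find?
        (fun p => pvGet2 A p.1 p.2 == mv) with
    | some p => [p.1, p.2]
    | none => []  -- unreachable (mv occurs in the triangle)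

-- ===== PRECONDITION & SPEC =====
-- Pre_ excludes 1×k matrices (k ≥ 2): there A returns its never-updated initialisation [0, 1] —
-- coordinates outside the (empty) strict upper triangle — while B's max() over the empty triangle
-- raises ValueError; every other excluded input is one where A itself raises IndexError.
def Pre_max_nd_el_coord (A : List (List Int)) : Prop :=
  2 ≤ A.length ∧ ∀ r ∈ A.dropLast, A.length ≤ r.length
instance (A : List (List Int)) : Decidable (Pre_max_nd_el_coord A) := by
  unfold Pre_max_nd_el_coord; infer_instance
def pvWitness_max_nd_el_coord : List (List Int) := [[1, 2], [3, 4]]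

def Spec_max_nd_el_coord (A : List (List Int)) (out : List Int) : Prop := out = max_nd_el_coord_alt A
instance (A : List (List Int)) (out : List Int) : Decidable (Spec_max_nd_el_coord A out) := by unfold Spec_max_nd_el_coord; infer_instance

-- ===== CLAIM (what is proved, stated in full; the proofs are below) =====
def Claim_equal_max_nd_el_coord : Prop := ∀ (A : List (List Int)), Dom_max_nd_el_coord A → Pre_max_nd_el_coord A → Spec_max_nd_el_coord A (max_nd_el_coord A)

-- ===== LEMMAS AND PROOFS =====

-- a foldl over a flatMap is the nested foldl
theorem pv_foldl_flatMap {α β γ : Type} (l : List α) (g : α → List β)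
    (F : γ → β → γ) (init : γ) :
    (l.flatMap g).foldl F init = l.foldl (fun st i => (g i).foldl F st) init := by
  induction l generalizing init with
  | nil => rfl
  | cons x t ih => simp [List.flatMap_cons, List.foldl_append, ih]

theorem pv_find?_congr {α : Type} (l : List α) (p q : α → Bool)
    (h : ∀ x ∈ l, p x = q x) : l.find? p = l.find? q := by
  induction l with
  | nil => rfl
  | cons x t ih =>
    have hx := h x (List.mem_cons_self)
    simp only [List.find?_cons, hx]
    cases q x with
    | true => rfl
    | false => exact ih (fun y hy => h y (List.mem_cons_of_mem _ hy))

-- the running max-with-coordinates loop, characterised as (max, first witness above the seed)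
theorem pv_core {α : Type} (f : α → Int) (g : α → List Int) (l : List α) (v : Int) (c : List Int) :
    l.foldl (fun st x => if st.1 < f x then (f x, g x) else st) (v, c)
    = ((l.map f).foldl max v,
       match l.find? (fun x => decide (v < f x) && (f x == (l.map f).foldl max v)) with
       | some x => g x
       | none => c) := by
  induction l generalizing v c with
  | nil => simp
  | cons x t ih =>
    simp only [List.foldl_cons, List.map_cons, List.find?_cons]
    by_cases hlt : v < f x
    · rw [if_pos hlt]
      have hmax : max v (f x) = f x := max_eq_right (le_of_lt hlt)
      rw [hmax, ih (f x) (g x)]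
      have hfx_le : f x ≤ (t.map f).foldl max (f x) := (PySem.List.le_foldl_max (t.map f) (f x)).1
      by_cases heq : f x = (t.map f).foldl max (f x)
      · -- new head is already the max: A's find? over t yields nothing; B's hits the head
        have hnone : t.find? (fun y => decide (f x < f y) && (f y == (t.map f).foldl max (f x))) = none := by
          rw [List.find?_eq_none]
          intro y hy
          by_cases hyM : f y = (t.map f).foldl max (f x)
          · simp [hyM, ← heq]
          · simp [hyM]
        have hhead : (decide (v < f x) && (f x == (t.map f).foldl max (f x))) = true := by
          simp [hlt, ← heq]
        rw [hnone, hhead]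
      · have hflt : f x < (t.map f).foldl max (f x) := lt_of_le_of_ne hfx_le heq
        have hcongr : ∀ y ∈ t, (decide (f x < f y) && (f y == (t.map f).foldl max (f x)))
            = (decide (v < f y) && (f y == (t.map f).foldl max (f x))) := by
          intro y _
          by_cases hyM : f y = (t.map f).foldl max (f x)
          · simp [hyM, hflt, lt_trans hlt hflt]
          · simp only [beq_eq_false_iff_ne.mpr hyM, Bool.and_false]
        rw [pv_find?_congr _ _ _ hcongr]
        have hhead : (decide (v < f x) && (f x == (t.map f).foldl max (f x))) = false := by
          simp [heq]
        rw [hhead]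
        -- the max is attained in t, so the find? succeeds and the fallbacks are irrelevant
        have hmem : (t.map f).foldl max (f x) ∈ t.map f := by
          rcases PySem.List.foldl_max_mem (t.map f) (f x) with h | h
          · exact absurd h.symm heq
          · exact h
        obtain ⟨y, hy, hfy⟩ := List.mem_map.mp hmem
        cases hfind : t.find? (fun y => decide (v < f y) && (f y == (t.map f).foldl max (f x))) with
        | none =>
          exfalso
          rw [List.find?_eq_none] at hfind
          exact hfind y hy (by simp [hfy, lt_trans hlt hflt])
        | some z => rfl
    · rw [if_neg hlt]
      have hmax : max v (f x) = v := max_eq_left (le_of_not_gt hlt)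
      rw [hmax, ih v c]
      have hhead : (decide (v < f x) && (f x == (t.map f).foldl max v)) = false := by
        simp [hlt]
      rw [hhead]

-- ===== VERDICT (by name: the statement is the Claim_ definition above) =====
theorem max_nd_el_coord_spec : Claim_equal_max_nd_el_coord := by
  intro A _ hPre
  obtain ⟨hlen, -⟩ := hPre
  have hn2 : (2 : Int) ≤ (A.length : Int) := by exact_mod_cast hlen
  unfold Spec_max_nd_el_coord max_nd_el_coord max_nd_el_coord_alt
  set pairs : List (Int × Int) := (PySem.List.pyRange 0 ((A.length : Int) - 1) 1).flatMap (fun i =>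
      (PySem.List.pyRange (i + 1) (A.length : Int) 1).map (fun j => (i, j))) with hpairs
  -- A's nested fold is the fold over the flattened pair list
  have hA : (PySem.List.pyRange 0 ((A.length : Int) - 1) 1).foldl (fun st i =>
        (PySem.List.pyRange (i + 1) (A.length : Int) 1).foldl (fun st j =>
          if st.1 < pvGet2 A i j then (pvGet2 A i j, [i, j]) else st) st)
        (pvGet2 A 0 1, ([0, 1] : List Int))
      = pairs.foldl (fun st p => if st.1 < pvGet2 A p.1 p.2 then (pvGet2 A p.1 p.2, [p.1, p.2]) else st)
        (pvGet2 A 0 1, ([0, 1] : List Int)) := by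
    rw [hpairs, pv_foldl_flatMap]
    simp [List.foldl_map]
  -- B's value list is the pair list mapped through the lookup
  have hvals : (PySem.List.pyRange 0 ((A.length : Int) - 1) 1).flatMap (fun i =>
      (PySem.List.pyRange (i + 1) (A.length : Int) 1).map (fun j => pvGet2 A i j))
      = pairs.map (fun p => pvGet2 A p.1 p.2) := by
    rw [hpairs]
    simp [List.map_flatMap, List.map_map, Function.comp_def]
  -- the pair list starts with (0, 1)
  obtain ⟨rest, hrest⟩ : ∃ rest, pairs = (0, 1) :: rest := by
    rw [hpairs, PySem.List.pyRange_one_cons (by omega : (0:Int) < (A.length : Int) - 1),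
      List.flatMap_cons, PySem.List.pyRange_one_cons (by omega : (0:Int) + 1 < (A.length : Int))]
    refine ⟨(PySem.List.pyRange (0 + 1 + 1) (A.length : Int) 1).map (fun j => ((0 : Int), j)) ++
      (PySem.List.pyRange (0 + 1) ((A.length : Int) - 1) 1).flatMap (fun i =>
        (PySem.List.pyRange (i + 1) (A.length : Int) 1).map (fun j => (i, j))), ?_⟩
    norm_num
  rw [hA, hvals, hrest,
    pv_core (fun p : Int × Int => pvGet2 A p.1 p.2) (fun p => [p.1, p.2])]
  simp only [List.map_cons, List.foldl_cons, max_self]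
  rw [PySem.List.max?_id_cons]
  have hvM : pvGet2 A 0 1 ≤ (rest.map (fun p => pvGet2 A p.1 p.2)).foldl max (pvGet2 A 0 1) :=
    (PySem.List.le_foldl_max _ _).1
  rcases eq_or_lt_of_le hvM with heq | hlt
  · -- the seed A[0][1] already is the maximum: both return [0, 1]
    have hnone : ((0, 1) :: rest).find? (fun x : Int × Int =>
        decide (pvGet2 A 0 1 < pvGet2 A x.1 x.2) &&
          (pvGet2 A x.1 x.2 == (rest.map (fun p => pvGet2 A p.1 p.2)).foldl max (pvGet2 A 0 1)))
        = none := by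
      rw [List.find?_eq_none]
      intro y hy
      by_cases hyM : pvGet2 A y.1 y.2 = (rest.map (fun p => pvGet2 A p.1 p.2)).foldl max (pvGet2 A 0 1)
      · simp [hyM, ← heq]
      · simp [hyM]
    have hfindB : ((0, 1) :: rest).find? (fun p : Int × Int =>
        pvGet2 A p.1 p.2 == (rest.map (fun p => pvGet2 A p.1 p.2)).foldl max (pvGet2 A 0 1))
        = some (0, 1) := by
      simp only [List.find?_cons, ← heq]
      simp
    simp [hnone, hfindB]
  · -- the maximum beats the seed: both return the first coordinates attaining it
    have hcongr : ∀ y ∈ (0, 1) :: rest,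
        (decide (pvGet2 A 0 1 < pvGet2 A y.1 y.2) &&
          (pvGet2 A y.1 y.2 == (rest.map (fun p => pvGet2 A p.1 p.2)).foldl max (pvGet2 A 0 1)))
        = (pvGet2 A y.1 y.2 == (rest.map (fun p => pvGet2 A p.1 p.2)).foldl max (pvGet2 A 0 1)) := by
      intro y _
      by_cases hyM : pvGet2 A y.1 y.2 = (rest.map (fun p => pvGet2 A p.1 p.2)).foldl max (pvGet2 A 0 1)
      · simp [hyM, hlt]
      · simp [hyM]
    rw [pv_find?_congr _ _ _ hcongr]
    have hmem : (rest.map (fun p => pvGet2 A p.1 p.2)).foldl max (pvGet2 A 0 1)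
        ∈ rest.map (fun p => pvGet2 A p.1 p.2) := by
      rcases PySem.List.foldl_max_mem (rest.map (fun p => pvGet2 A p.1 p.2)) (pvGet2 A 0 1) with h | h
      · exact absurd h.symm (ne_of_lt hlt)
      · exact h
    obtain ⟨y, hy, hfy⟩ := List.mem_map.mp hmem
    cases hfind : ((0, 1) :: rest).find? (fun p : Int × Int =>
        pvGet2 A p.1 p.2 == (rest.map (fun p => pvGet2 A p.1 p.2)).foldl max (pvGet2 A 0 1)) with
    | none =>
      exfalso
      rw [List.find?_eq_none] at hfind
      exact hfind y (List.mem_cons_of_mem _ hy) (by simp [hfy])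
    | some z => simp [hfind]
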